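-- pv_equiv track=rewrite | github.com/SergioRoldan/DNNClassifier | serving_tags_model/model/dataHandler.py | checkConfusionMatrix
-- ===== SOURCE A (Python) =====
-- def checkConfusionMatrix(confusionMatrix):
--
--     correctSum = 0
--     correctTarg = 0
--     incorrectSum = 0
--
--     for i in range(len(confusionMatrix)):
--         for j in range(len(confusionMatrix)):
--             if i == j:
--                 correctSum += confusionMatrix[i][j]
--                 correctTarg += 1
--             else:
--                 incorrectSum += confusionMatrix[i][j]
--
--     return str(correctTarg), str(correctSum), str(incorrectSum)
-- ===== SOURCE B (Python) =====
-- def checkConfusionMatrix(confusionMatrix):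
--     n = len(confusionMatrix)
--     correctSum = sum(confusionMatrix[i][i] for i in range(n))
--     total = sum(confusionMatrix[i][j] for i in range(n) for j in range(n))
--     return str(n), str(correctSum), str(total - correctSum)
-- ===== Notes on version B (the rewrite author's own statement) =====
-- stated objective: simpler
-- what changed: Replaces A's single branching double loop and three accumulators by two direct reductions (diagonal sum and grand total over the same indexed cells), returning len(matrix) as the diagonal count and obtaining the off-diagonal sum as total minus diagonal.
import Mathlib
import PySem

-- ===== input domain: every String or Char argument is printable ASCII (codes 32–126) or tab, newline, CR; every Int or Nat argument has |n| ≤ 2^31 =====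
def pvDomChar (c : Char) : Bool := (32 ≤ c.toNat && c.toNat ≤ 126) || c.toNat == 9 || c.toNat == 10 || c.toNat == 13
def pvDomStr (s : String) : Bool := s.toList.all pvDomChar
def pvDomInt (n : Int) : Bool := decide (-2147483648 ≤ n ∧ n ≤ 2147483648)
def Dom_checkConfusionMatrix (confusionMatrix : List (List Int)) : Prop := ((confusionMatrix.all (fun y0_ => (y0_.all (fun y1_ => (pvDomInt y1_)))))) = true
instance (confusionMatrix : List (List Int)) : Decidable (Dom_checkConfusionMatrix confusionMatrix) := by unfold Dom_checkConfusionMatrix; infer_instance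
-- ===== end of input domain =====

-- B replaces A's branching double loop by a diagonal sum and a grand total (off-diagonal = total - diagonal); objective: simpler.

-- ===== PORT A =====
def checkConfusionMatrix (confusionMatrix : List (List Int)) : String × String × String :=
  let n : Int := (confusionMatrix.length : Int)
  let r := (PySem.List.pyRange 0 n 1).foldl (fun s i =>
      (PySem.List.pyRange 0 n 1).foldl (fun s j =>
        if i == j then
          (s.1 + PySem.List.pyGetD (PySem.List.pyGetD confusionMatrix i []) j 0, s.2.1 + 1, s.2.2)
        else
          (s.1, s.2.1, s.2.2 + PySem.List.pyGetD (PySem.List.pyGetD confusionMatrix i []) j 0)) s)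
    ((0 : Int), (0 : Int), (0 : Int))
  (PySem.Int.toStr r.2.1, PySem.Int.toStr r.1, PySem.Int.toStr r.2.2)

-- ===== PORT B =====
def checkConfusionMatrix_alt (confusionMatrix : List (List Int)) : String × String × String :=
  let n : Int := (confusionMatrix.length : Int)
  let correctSum := ((PySem.List.pyRange 0 n 1).map (fun i =>
      PySem.List.pyGetD (PySem.List.pyGetD confusionMatrix i []) i 0)).sum
  let total := ((PySem.List.pyRange 0 n 1).map (fun i =>
      ((PySem.List.pyRange 0 n 1).map (fun j =>
        PySem.List.pyGetD (PySem.List.pyGetD confusionMatrix i []) j 0)).sum)).sum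
  (PySem.Int.toStr n, PySem.Int.toStr correctSum, PySem.Int.toStr (total - correctSum))

-- ===== PRECONDITION & SPEC =====
-- Pre_ excludes exactly the ragged matrices on which Python A raises IndexError
-- (some row shorter than the number of rows).
def Pre_checkConfusionMatrix (confusionMatrix : List (List Int)) : Prop :=
  (confusionMatrix.all (fun row => confusionMatrix.length ≤ row.length)) = true
instance (confusionMatrix : List (List Int)) : Decidable (Pre_checkConfusionMatrix confusionMatrix) := by unfold Pre_checkConfusionMatrix; infer_instance
def pvWitness_checkConfusionMatrix : List (List Int) := [[1, 2], [3, 4]]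

def Spec_checkConfusionMatrix (confusionMatrix : List (List Int)) (out : String × String × String) : Prop := out = checkConfusionMatrix_alt confusionMatrix
instance (confusionMatrix : List (List Int)) (out : String × String × String) : Decidable (Spec_checkConfusionMatrix confusionMatrix out) := by unfold Spec_checkConfusionMatrix; infer_instance

-- ===== CLAIM (what is proved, stated in full; the proofs are below) =====
def Claim_equal_checkConfusionMatrix : Prop := ∀ (confusionMatrix : List (List Int)), Dom_checkConfusionMatrix confusionMatrix → Pre_checkConfusionMatrix confusionMatrix → Spec_checkConfusionMatrix confusionMatrix (checkConfusionMatrix confusionMatrix)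

-- ===== LEMMAS AND PROOFS =====

-- Inner loop of A, over an arbitrary index list J, computed in closed form.
theorem inner_loop_eq (g : Int → Int) (i : Int) (J : List Int) :
    ∀ (cs ct ics : Int),
      J.foldl (fun s j =>
        if i = j then (s.1 + g j, s.2.1 + 1, s.2.2)
        else (s.1, s.2.1, s.2.2 + g j)) (cs, ct, ics)
      = (cs + (J.map (fun j => if i = j then g j else 0)).sum,
         ct + (J.map (fun j => if i = j then (1 : Int) else 0)).sum,
         ics + (J.map (fun j => if i = j then 0 else g j)).sum) := by
  induction J with
  | nil => intro cs ct ics; simp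
  | cons j J ih =>
      intro cs ct ics
      by_cases h : i = j
      · subst h
        simp only [List.foldl_cons, List.map_cons, List.sum_cons, ih,
          if_true, Prod.mk.injEq]
        exact ⟨by ring, by ring, by ring⟩
      · simp only [List.foldl_cons, if_neg h, List.map_cons, List.sum_cons, ih, Prod.mk.injEq]
        exact ⟨by ring, by ring, by ring⟩

theorem sum_ite_eq_of_nodup (g : Int → Int) (i : Int) (J : List Int)
    (hnd : J.Nodup) (hmem : i ∈ J) :
    (J.map (fun j => if i = j then g j else 0)).sum = g i := by
  induction J with
  | nil => cases hmem
  | cons j J ih =>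
      simp only [List.map_cons, List.sum_cons]
      rcases List.mem_cons.mp hmem with h | h
      · subst h
        have : (J.map (fun j => if i = j then g j else 0)).sum = 0 := by
          apply List.sum_eq_zero
          intro x hx
          rcases List.mem_map.mp hx with ⟨y, hy, rfl⟩
          have : i ≠ y := fun e => (List.nodup_cons.mp hnd).1 (e ▸ hy)
          simp [this]
        simp [this]
      · have hne : i ≠ j := fun e => (List.nodup_cons.mp hnd).1 (e ▸ h)
        simp [hne, ih (List.nodup_cons.mp hnd).2 h]

theorem sum_ite_compl (g : Int → Int) (i : Int) (J : List Int) :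
    (J.map (fun j => if i = j then 0 else g j)).sum
      = (J.map g).sum - (J.map (fun j => if i = j then g j else 0)).sum := by
  induction J with
  | nil => simp
  | cons j J ih =>
      by_cases h : i = j
      · subst h; simp [ih]
      · simp [h, ih]; ring

-- The inner loop for i drawn from a nodup list containing i.
theorem inner_loop_closed (g : Int → Int) (i : Int) (J : List Int)
    (hnd : J.Nodup) (hmem : i ∈ J) (cs ct ics : Int) :
    J.foldl (fun s j =>
      if i = j then (s.1 + g j, s.2.1 + 1, s.2.2)
      else (s.1, s.2.1, s.2.2 + g j)) (cs, ct, ics)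
    = (cs + g i, ct + 1, ics + ((J.map g).sum - g i)) := by
  rw [inner_loop_eq]
  rw [sum_ite_eq_of_nodup g i J hnd hmem, sum_ite_compl,
      sum_ite_eq_of_nodup g i J hnd hmem]
  have : (J.map (fun j => if i = j then (1 : Int) else 0)).sum = 1 := by
    have := sum_ite_eq_of_nodup (fun _ => (1 : Int)) i J hnd hmem
    simpa using this
  rw [this]

-- Outer loop: fold of inner_loop_closed over a list of distinct indices all inside J.
theorem outer_loop_closed (g : Int → Int → Int) (J : List Int)
    (hnd : J.Nodup) :
    ∀ (L : List Int), (∀ i ∈ L, i ∈ J) → ∀ (cs ct ics : Int),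
      L.foldl (fun s i =>
        J.foldl (fun s j =>
          if i = j then (s.1 + g i j, s.2.1 + 1, s.2.2)
          else (s.1, s.2.1, s.2.2 + g i j)) s) (cs, ct, ics)
      = (cs + (L.map (fun i => g i i)).sum,
         ct + L.length,
         ics + ((L.map (fun i => (J.map (g i)).sum)).sum - (L.map (fun i => g i i)).sum)) := by
  intro L
  induction L with
  | nil => intro _ cs ct ics; simp
  | cons i L ih =>
      intro hsub cs ct ics
      simp only [List.foldl_cons]
      rw [inner_loop_closed (g i) i J hnd (hsub i (List.mem_cons_self))]
      rw [ih (fun x hx => hsub x (List.mem_cons_of_mem _ hx))]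
      simp only [List.map_cons, List.sum_cons, List.length_cons]
      refine Prod.ext ?_ (Prod.ext ?_ ?_)
      · simp; ring
      · simp; ring
      · simp; ring

-- ===== VERDICT (by name: the statement is the Claim_ definition above) =====
theorem checkConfusionMatrix_spec : Claim_equal_checkConfusionMatrix := by
  intro M _ _
  unfold Spec_checkConfusionMatrix checkConfusionMatrix checkConfusionMatrix_alt
  simp only [beq_iff_eq]
  set J := PySem.List.pyRange 0 (M.length : Int) 1 with hJ
  have hnd : J.Nodup := PySem.List.nodup_pyRange_one 0 (M.length : Int)
  rw [outer_loop_closed (fun i j => PySem.List.pyGetD (PySem.List.pyGetD M i []) j 0) J hnd J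
      (fun i hi => hi)]
  have hlen : (J.length : Int) = (M.length : Int) := by
    rw [hJ, PySem.List.length_pyRange_one]; simp
  simp [hlen]
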